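-- pv_equiv track=rewrite | github.com/Zyad1999/Problem-Solving | The Maximum Subarray.py | solve
-- ===== SOURCE A (Python) =====
-- def solve(A):
--     if max(A) <= 0:
--         return (max(A), max(A))
--
--     x, y, s, b = 0, 0, 0, 0
--     for i, a in enumerate(A):
--         if s == 0 and a > 0:
--             x = i
--         s += a
--         if s < 0:
--             s = 0
--
--         if s > b:
--             b = s
--     return (b, sum(a for a in A if a > 0))
-- ===== SOURCE B (Python) =====
-- def solve(A):
--     m = max(A)
--     if m <= 0:
--         return (m, m)
--     best, cur, minp, pos = 0, 0, 0, 0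
--     for a in A:
--         cur += a
--         if cur - minp > best:
--             best = cur - minp
--         if cur < minp:
--             minp = cur
--         if a > 0:
--             pos += a
--     return (best, pos)
-- ===== Notes on version B (the rewrite author's own statement) =====
-- stated objective: alternative
-- what changed: Kadane's reset-to-zero scan is replaced by a prefix-sum formulation (running cumulative sum minus minimum prefix seen so far), with the positives sum folded into the same single loop instead of a second pass.
import Mathlib
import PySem

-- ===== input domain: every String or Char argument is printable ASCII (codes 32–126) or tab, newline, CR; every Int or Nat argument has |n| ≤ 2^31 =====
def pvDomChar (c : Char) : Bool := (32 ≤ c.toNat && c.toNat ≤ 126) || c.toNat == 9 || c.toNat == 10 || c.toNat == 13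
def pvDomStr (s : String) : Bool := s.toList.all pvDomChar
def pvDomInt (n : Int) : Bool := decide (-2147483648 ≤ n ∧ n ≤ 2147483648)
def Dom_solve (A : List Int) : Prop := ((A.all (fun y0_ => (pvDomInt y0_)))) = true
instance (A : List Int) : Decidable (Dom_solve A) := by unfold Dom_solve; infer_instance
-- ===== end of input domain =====

-- B replaces Kadane's reset-to-zero scan by a prefix-sum / minimum-prefix formulation and folds the
-- positives sum into the same single loop (alternative decomposition, same O(n) cost).

-- ===== PORT A =====
-- A's loop body over enumerate(A): state (x, y, s, b); x and y are dead for the result but kept faithfully.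
def solveStepA (st : Int × Int × Int × Int) (ia : Int × Int) : Int × Int × Int × Int :=
  let x := if st.2.2.1 = 0 ∧ ia.2 > 0 then ia.1 else st.1
  let s := st.2.2.1 + ia.2
  let s := if s < 0 then 0 else s
  let b := if s > st.2.2.2 then s else st.2.2.2
  (x, st.2.1, s, b)

def solve (A : List Int) : Int × Int :=
  match PySem.List.max? A (fun y => y) with
  | none => (0, 0)  -- unreachable under Pre_solve: Python's max([]) raises ValueError
  | some m =>
    if m ≤ 0 then (m, m)
    else
      let st := (PySem.List.enumerate A).foldl solveStepA (0, 0, 0, 0)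
      (st.2.2.2, A.foldl (fun acc a => if a > 0 then acc + a else acc) 0)

-- ===== PORT B =====
-- B's loop body: state (best, cur, minp, pos).
def solveStepB (st : Int × Int × Int × Int) (a : Int) : Int × Int × Int × Int :=
  let cur := st.2.1 + a
  let best := if cur - st.2.2.1 > st.1 then cur - st.2.2.1 else st.1
  let minp := if cur < st.2.2.1 then cur else st.2.2.1
  let pos := if a > 0 then st.2.2.2 + a else st.2.2.2
  (best, cur, minp, pos)

def solve_alt (A : List Int) : Int × Int :=
  match PySem.List.max? A (fun y => y) with
  | none => (0, 0)  -- unreachable under Pre_solve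
  | some m =>
    if m ≤ 0 then (m, m)
    else
      let st := A.foldl solveStepB (0, 0, 0, 0)
      (st.1, st.2.2.2)

-- ===== PRECONDITION & SPEC =====
-- Pre_ excludes only the empty list, on which Python's max(A) raises ValueError in both programs.
def Pre_solve (A : List Int) : Prop := A ≠ []
instance (A : List Int) : Decidable (Pre_solve A) := by unfold Pre_solve; infer_instance
def pvWitness_solve : List Int := [1, -2, 3]

def Spec_solve (A : List Int) (out : Int × Int) : Prop := out = solve_alt A
instance (A : List Int) (out : Int × Int) : Decidable (Spec_solve A out) := by unfold Spec_solve; infer_instance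

-- ===== CLAIM (what is proved, stated in full; the proofs are below) =====
def Claim_equal_solve : Prop := ∀ (A : List Int), Dom_solve A → Pre_solve A → Spec_solve A (solve A)

-- ===== LEMMAS AND PROOFS =====

-- Loop correspondence: Kadane's state (x,y,s,b) relates to the prefix-min state (best,cur,minp,pos)
-- by s = cur - minp and b = best (with s, b nonnegative), over any list of index/value pairs.
theorem loop_eq (ps : List (Int × Int)) (x y s b best cur minp pos : Int)
    (h1 : s = cur - minp) (h2 : 0 ≤ s) (h3 : b = best) (h4 : 0 ≤ b) :
    (ps.foldl solveStepA (x, y, s, b)).2.2.2 = ((ps.map Prod.snd).foldl solveStepB (best, cur, minp, pos)).1 ∧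
    ((ps.map Prod.snd).foldl solveStepB (best, cur, minp, pos)).2.2.2 =
      (ps.map Prod.snd).foldl (fun acc a => if a > 0 then acc + a else acc) pos := by
  induction ps generalizing x y s b best cur minp pos with
  | nil => exact ⟨h3, rfl⟩
  | cons p t ih =>
    simp only [List.map_cons, List.foldl_cons, solveStepA, solveStepB]
    by_cases hneg : cur + p.2 - minp < 0
    · have hs : s + p.2 < 0 := by omega
      rw [if_pos (by omega : s + p.2 < 0)]
      rw [if_neg (by omega : ¬ cur + p.2 - minp > best), if_pos (by omega : cur + p.2 < minp)]
      rw [if_neg (by omega : ¬ (0:Int) > b)]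
      exact ih _ _ _ _ _ _ _ _ (by omega) le_rfl h3 h4
    · rw [if_neg (by omega : ¬ s + p.2 < 0)]
      rw [if_neg (by omega : ¬ cur + p.2 < minp)]
      by_cases hgt : cur + p.2 - minp > best
      · rw [if_pos hgt, if_pos (by omega : s + p.2 > b)]
        exact ih _ _ _ _ _ _ _ _ (by omega) (by omega) (by omega) (by omega)
      · rw [if_neg hgt, if_neg (by omega : ¬ s + p.2 > b)]
        exact ih _ _ _ _ _ _ _ _ (by omega) (by omega) h3 h4

-- ===== VERDICT (by name: the statement is the Claim_ definition above) =====
theorem solve_spec : Claim_equal_solve := by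
  intro A _ _
  unfold Spec_solve solve solve_alt
  cases hmax : PySem.List.max? A (fun y => y) with
  | none => rfl
  | some m =>
    simp only []
    by_cases hm : m ≤ 0
    · rw [if_pos hm, if_pos hm]
    · rw [if_neg hm, if_neg hm]
      have h := loop_eq (PySem.List.enumerate A) 0 0 0 0 0 0 0 0 (by omega) le_rfl rfl le_rfl
      rw [PySem.List.map_snd_enumerate] at h
      exact Prod.ext h.1 h.2.symm
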